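-- pv_equiv track=rewrite | github.com/sympy/sympy | sympy/ntheory/tests/test_factor_.py | multiproduct
-- ===== SOURCE A (Python) =====
-- def multiproduct(seq=(), start=1):
--     """
--     Return the product of a sequence of factors with multiplicities,
--     times the value of the parameter ``start``. The input may be a
--     sequence of (factor, exponent) pairs or a dict of such pairs.
--
--         >>> multiproduct({3:7, 2:5}, 4) # = 3**7 * 2**5 * 4
--         279936
--
--     """
--     if not seq:
--         return start
--     if isinstance(seq, dict):
--         seq = iter(seq.items())
--     units = start
--     multi = []
--     for base, exp in seq:
--         if not exp:
--             continue
--         elif exp == 1: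
--             units *= base
--         else:
--             if exp % 2:
--                 units *= base
--             multi.append((base, exp//2))
--     return units * multiproduct(multi)**2
-- ===== SOURCE B (Python) =====
-- def multiproduct(seq=(), start=1):
--     """Product of factor**exponent over the pairs, times start (flat one-pass form)."""
--     items = seq.items() if isinstance(seq, dict) else seq
--     result = start
--     for base, exp in items:
--         result *= base ** exp
--     return result
-- ===== Notes on version B (the rewrite author's own statement) =====
-- stated objective: simpler
-- what changed: Replaced A's recursive exponent-halving/squaring scheme (odd-exponent peeling into 'units', halved pairs re-multiplied and squared recursively) with a single flat left-to-right accumulator multiplying base**exp per pair.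
import Mathlib
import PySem

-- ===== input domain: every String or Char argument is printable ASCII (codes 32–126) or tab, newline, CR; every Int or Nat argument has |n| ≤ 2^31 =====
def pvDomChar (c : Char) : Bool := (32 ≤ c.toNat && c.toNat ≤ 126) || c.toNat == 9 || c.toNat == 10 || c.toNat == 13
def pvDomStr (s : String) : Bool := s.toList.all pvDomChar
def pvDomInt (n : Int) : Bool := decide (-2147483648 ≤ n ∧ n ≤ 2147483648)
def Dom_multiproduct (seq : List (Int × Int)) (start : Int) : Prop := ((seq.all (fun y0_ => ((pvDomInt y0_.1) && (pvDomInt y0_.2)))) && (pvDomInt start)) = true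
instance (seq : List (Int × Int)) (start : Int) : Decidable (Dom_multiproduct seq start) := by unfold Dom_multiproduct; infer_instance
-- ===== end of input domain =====

-- B replaces A's recursive exponent-halving/squaring scheme by a single flat
-- left-to-right product of base^exp, for simplicity (same asymptotic cost).


-- ===== PORT A =====
-- one iteration of A's 'for base, exp in seq' loop over the state (units, multi)
def maStep (st : Int × List (Int × Int)) (p : Int × Int) : Int × List (Int × Int) :=
  if p.2 = 0 then st
  else if p.2 = 1 then (st.1 * p.1, st.2)
  else
    ((if PySem.Int.mod p.2 2 ≠ 0 then st.1 * p.1 else st.1),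
     st.2 ++ [(p.1, PySem.Int.floordiv p.2 2)])

-- A's recursion; the Nat fuel only makes the recursion total in Lean — on every input
-- admitted by Pre_ the fuel chosen in 'multiproduct' is never exhausted (proved below).
def multiproductFuel : Nat → List (Int × Int) → Int → Int
  | 0, _, start => start
  | fuel + 1, seq, start0 =>
    if seq = [] then start0
    else
      let st := seq.foldl maStep (start0, [])
      st.1 * multiproductFuel fuel st.2 1 ^ 2

def multiproduct (seq : List (Int × Int)) (start : Int) : Int :=
  multiproductFuel ((seq.map (fun p => p.2.toNat)).sum + 1) seq start

-- ===== PORT B =====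
def multiproduct_alt (seq : List (Int × Int)) (start : Int) : Int :=
  seq.foldl (fun acc p => acc * p.1 ^ p.2.toNat) start

-- ===== PRECONDITION & SPEC =====
-- Pre_ excludes pairs with a negative exponent: there Python A recurses forever
-- (RecursionError), so A returns on exactly the inputs Pre_ admits.
def Pre_multiproduct (seq : List (Int × Int)) (start : Int) : Prop :=
  ∀ p ∈ seq, 0 ≤ p.2
instance (seq : List (Int × Int)) (start : Int) : Decidable (Pre_multiproduct seq start) := by
  unfold Pre_multiproduct; infer_instance
def pvWitness_multiproduct : (List (Int × Int)) × Int := ([(3, 7), (2, 5)], 4)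

def Spec_multiproduct (seq : List (Int × Int)) (start : Int) (out : Int) : Prop := out = multiproduct_alt seq start
instance (seq : List (Int × Int)) (start : Int) (out : Int) : Decidable (Spec_multiproduct seq start out) := by unfold Spec_multiproduct; infer_instance

-- ===== CLAIM (what is proved, stated in full; the proofs are below) =====
def Claim_equal_multiproduct : Prop := ∀ (seq : List (Int × Int)) (start : Int), Dom_multiproduct seq start → Pre_multiproduct seq start → Spec_multiproduct seq start (multiproduct seq start)

-- ===== LEMMAS AND PROOFS =====

-- mathematical product the ports compute
def pvP (seq : List (Int × Int)) : Int := (seq.map (fun p => p.1 ^ p.2.toNat)).prod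
-- the multiplicand A's loop folds into 'units' for one pair
def pvU1 (p : Int × Int) : Int :=
  if p.2 = 0 then 1 else if p.2 = 1 then p.1
  else if PySem.Int.mod p.2 2 ≠ 0 then p.1 else 1
-- the pairs A's loop appends to 'multi' for one pair
def pvM1 (p : Int × Int) : List (Int × Int) :=
  if p.2 = 0 then [] else if p.2 = 1 then [] else [(p.1, PySem.Int.floordiv p.2 2)]

lemma pvAlt_eq (seq : List (Int × Int)) (start : Int) :
    multiproduct_alt seq start = start * pvP seq := by
  induction seq generalizing start with
  | nil => simp [multiproduct_alt, pvP]
  | cons p t ih =>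
    show List.foldl _ (start * p.1 ^ p.2.toNat) t = _
    rw [show List.foldl (fun acc p => acc * p.1 ^ p.2.toNat) (start * p.1 ^ p.2.toNat) t
          = multiproduct_alt t (start * p.1 ^ p.2.toNat) from rfl, ih]
    simp [pvP]; ring

lemma pvFold_eq (seq : List (Int × Int)) (units : Int) (multi : List (Int × Int)) :
    seq.foldl maStep (units, multi) =
      (units * (seq.map pvU1).prod, multi ++ seq.flatMap pvM1) := by
  induction seq generalizing units multi with
  | nil => simp
  | cons p t ih =>
    simp only [List.foldl_cons, maStep, List.map_cons, List.prod_cons, List.flatMap_cons]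
    split_ifs with h0 h1 hm
    · rw [ih]; rw [show pvU1 p = 1 by unfold pvU1; rw [if_pos h0],
        show pvM1 p = [] by unfold pvM1; rw [if_pos h0]]; simp
    · rw [ih]; rw [show pvU1 p = p.1 by unfold pvU1; rw [if_neg h0, if_pos h1],
        show pvM1 p = [] by unfold pvM1; rw [if_neg h0, if_pos h1]]; simp [mul_assoc]
    · rw [ih]; rw [show pvU1 p = p.1 by unfold pvU1; rw [if_neg h0, if_neg h1, if_pos hm],
        show pvM1 p = [(p.1, PySem.Int.floordiv p.2 2)] by unfold pvM1; rw [if_neg h0, if_neg h1]]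
      simp [mul_assoc]
    · rw [ih]; rw [show pvU1 p = 1 by unfold pvU1; rw [if_neg h0, if_neg h1, if_neg hm],
        show pvM1 p = [(p.1, PySem.Int.floordiv p.2 2)] by unfold pvM1; rw [if_neg h0, if_neg h1]]
      simp

lemma pvP_append (a b : List (Int × Int)) : pvP (a ++ b) = pvP a * pvP b := by
  simp [pvP]

-- one pair: its factor b^e splits into the units contribution times the square of
-- the halved pair's factor (this is where e = 2*(e//2) + e%2 is used)
lemma pvSplit (p : Int × Int) (he : 0 ≤ p.2) :
    p.1 ^ p.2.toNat = pvU1 p * pvP (pvM1 p) ^ 2 := by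
  obtain ⟨b, e⟩ := p
  simp only [pvU1, pvM1, pvP]
  split_ifs with h0 h1 hm
  · simp [h0]
  · simp [h1]
  all_goals
    simp only [List.map_cons, List.map_nil, List.prod_cons, List.prod_nil, mul_one, one_mul]
    rw [PySem.Int.floordiv_eq_ediv_of_pos (by omega)]
    rw [← pow_mul]
    first
      | (rw [← pow_succ']
         congr 1
         rw [PySem.Int.mod_eq_emod_of_pos (by omega)] at hm
         omega)
      | (congr 1
         rw [PySem.Int.mod_eq_emod_of_pos (by omega)] at hm
         omega)

lemma pvP_M (seq : List (Int × Int)) (h : ∀ p ∈ seq, 0 ≤ p.2) :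
    pvP seq = (seq.map pvU1).prod * pvP (seq.flatMap pvM1) ^ 2 := by
  induction seq with
  | nil => simp [pvP]
  | cons p t ih =>
    have hp := h p (by simp)
    have ht := ih (fun q hq => h q (by simp [hq]))
    simp only [List.flatMap_cons, List.map_cons, List.prod_cons]
    rw [pvP_append]
    have : pvP (p :: t) = p.1 ^ p.2.toNat * pvP t := by simp [pvP]
    rw [this, pvSplit p hp, ht]; ring

lemma pvM_exps (seq : List (Int × Int)) (h : ∀ p ∈ seq, 0 ≤ p.2) :
    ∀ q ∈ seq.flatMap pvM1, 0 ≤ q.2 := by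
  intro q hq
  simp only [List.mem_flatMap] at hq
  obtain ⟨p, hp, hq⟩ := hq
  have := h p hp
  simp only [pvM1] at hq
  split_ifs at hq with h0 h1 <;> simp at hq
  subst hq
  simp only
  omega

lemma pvM_sum (seq : List (Int × Int)) (h : ∀ p ∈ seq, 0 ≤ p.2) :
    ((seq.flatMap pvM1).map (fun p => p.2.toNat)).sum + (seq.flatMap pvM1).length
      ≤ (seq.map (fun p => p.2.toNat)).sum := by
  induction seq with
  | nil => simp
  | cons p t ih =>
    have hp := h p (by simp)
    have ht := ih (fun q hq => h q (by simp [hq]))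
    simp only [List.flatMap_cons, List.map_cons, List.sum_cons, List.map_append,
      List.sum_append, List.length_append]
    have hone : ((pvM1 p).map (fun q => q.2.toNat)).sum + (pvM1 p).length ≤ p.2.toNat := by
      simp only [pvM1]
      split_ifs with h0 h1
      · simp
      · simp
      · simp only [List.map_cons, List.map_nil, List.sum_cons, List.sum_nil,
          List.length_cons, List.length_nil]
        rw [PySem.Int.floordiv_eq_ediv_of_pos (by omega)]
        omega
    omega

lemma pvFuel_nil (fuel : Nat) (start : Int) : multiproductFuel fuel [] start = start := by
  cases fuel <;> simp [multiproductFuel]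

lemma pvFuel_correct (fuel : Nat) (seq : List (Int × Int)) (start : Int)
    (h : ∀ p ∈ seq, 0 ≤ p.2) (hf : (seq.map (fun p => p.2.toNat)).sum < fuel) :
    multiproductFuel fuel seq start = start * pvP seq := by
  induction fuel generalizing seq start with
  | zero => omega
  | succ fuel ih =>
    by_cases hnil : seq = []
    · subst hnil; simp [multiproductFuel, pvP]
    · simp only [multiproductFuel, hnil, if_false]
      rw [pvFold_eq]
      have hrec : multiproductFuel fuel (seq.flatMap pvM1) 1 = pvP (seq.flatMap pvM1) := by
        by_cases hmn : seq.flatMap pvM1 = []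
        · rw [hmn, pvFuel_nil]; simp [pvP]
        · have hsum := pvM_sum seq h
          have hlen : 1 ≤ (seq.flatMap pvM1).length := List.length_pos_iff.mpr hmn
          simpa using ih _ 1 (pvM_exps seq h) (by omega)
      simp only [List.nil_append, hrec]
      rw [pvP_M seq h]; ring

-- ===== VERDICT (by name: the statement is the Claim_ definition above) =====
theorem multiproduct_spec : Claim_equal_multiproduct := by
  intro seq start _ hpre
  unfold Spec_multiproduct
  rw [pvAlt_eq]
  exact pvFuel_correct _ seq start hpre (by omega)
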